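-- pv_equiv track=rewrite | github.com/miri-san-so/zelig | zelig.py | isValidYesOrNo
-- ===== SOURCE A (Python) =====
-- def isValidYesOrNo(user_input):
--     strin = user_input
--     strin = list(strin.split(' '))
--     approved_words = []
--
--     for i in strin:
--         if i == "yes":
--             approved_words.append(i)
--         elif i == "yup":
--             approved_words.append(i)
--         elif i == "yeah":
--             approved_words.append(i)
--         elif i == "sure":
--             approved_words.append(i)
--         elif i == "no":
--             approved_words.append(i)
--         elif i == "don't":
--             approved_words.append(i)
--         elif i == "do not":
--             approved_words.append(i)
--         elif i == "stop":
--             approved_words.append(i)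
--         else:
--             continue
--
--     flag_yes = 0
--     flag_no = 0
--     stop = False
--     for i in approved_words:
--         if i == "yes" or "yeah" or "yup" or "sure":
--             flag_yes += 1
--         if i == "no" or "don't" or "do not":
--             flag_no += 1
--         if i == "stop":
--             stop = True
--
--     if flag_yes != 0:
--         return "yes"
--     if flag_no != 0:
--         return "no"
--     if stop == True:
--         return "stop"
-- ===== SOURCE B (Python) =====
-- APPROVED = {"yes", "yup", "yeah", "sure", "no", "don't", "do not", "stop"}
--
--
-- def isValidYesOrNo(user_input):
--     for token in user_input.split(' '):
--         if token in APPROVED: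
--             return "yes"
--     return None
-- ===== Notes on version B (the rewrite author's own statement) =====
-- stated objective: simpler
-- what changed: Replaces A's build-a-filtered-list pass plus a flag-counting second scan (whose always-true condition makes the yes-counter positive whenever any approved word occurs) by a single early-return pass over the tokens that answers affirmatively at the first approved token and returns None after the loop.
import Mathlib
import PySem

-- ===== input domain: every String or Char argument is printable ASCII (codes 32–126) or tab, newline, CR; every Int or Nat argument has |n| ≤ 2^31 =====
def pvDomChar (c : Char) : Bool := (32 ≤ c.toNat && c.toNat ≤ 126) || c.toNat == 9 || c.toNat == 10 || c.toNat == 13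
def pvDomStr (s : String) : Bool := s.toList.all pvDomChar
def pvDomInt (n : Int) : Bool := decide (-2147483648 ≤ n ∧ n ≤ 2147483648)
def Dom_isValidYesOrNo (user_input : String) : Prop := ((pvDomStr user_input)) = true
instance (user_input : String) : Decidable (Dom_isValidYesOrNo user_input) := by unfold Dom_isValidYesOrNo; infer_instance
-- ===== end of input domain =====

-- B collapses A's two passes (build approved_words, then count flags with an always-true
-- condition) into one early-return scan over the tokens; same return value everywhere.

-- ===== PORT A =====
-- first loop of A: the if/elif chain appending approved words
def pvBuildA (acc : List String) : List String → List String
  | [] => acc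
  | i :: rest =>
    if i == "yes" then pvBuildA (acc ++ [i]) rest
    else if i == "yup" then pvBuildA (acc ++ [i]) rest
    else if i == "yeah" then pvBuildA (acc ++ [i]) rest
    else if i == "sure" then pvBuildA (acc ++ [i]) rest
    else if i == "no" then pvBuildA (acc ++ [i]) rest
    else if i == "don't" then pvBuildA (acc ++ [i]) rest
    else if i == "do not" then pvBuildA (acc ++ [i]) rest
    else if i == "stop" then pvBuildA (acc ++ [i]) rest
    else pvBuildA acc rest

-- second loop of A: Python's `i == "yes" or "yeah" ...` is truthy for every i ("yeah" is a
-- non-empty string), likewise the flag_no condition; ported exactly as that truthiness.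
def pvFlagsA (fy fn : Int) (stop : Bool) : List String → Int × Int × Bool
  | [] => (fy, fn, stop)
  | i :: rest =>
    let fy := if i == "yes" ∨ "yeah" ≠ "" then fy + 1 else fy
    let fn := if i == "no" ∨ "don't" ≠ "" then fn + 1 else fn
    let stop := if i == "stop" then true else stop
    pvFlagsA fy fn stop rest

def isValidYesOrNo (user_input : String) : Option String :=
  let strin := (PySem.Str.split? user_input " ").getD []
  let approved_words := pvBuildA [] strin
  let r := pvFlagsA 0 0 false approved_words
  if r.1 ≠ 0 then some "yes"
  else if r.2.1 ≠ 0 then some "no"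
  else if r.2.2 = true then some "stop"
  else none

-- ===== PORT B =====
def pvApprovedSet : List String := ["yes", "yup", "yeah", "sure", "no", "don't", "do not", "stop"]

def pvScanB : List String → Option String
  | [] => none
  | token :: rest => if token ∈ pvApprovedSet then some "yes" else pvScanB rest

def isValidYesOrNo_alt (user_input : String) : Option String :=
  pvScanB ((PySem.Str.split? user_input " ").getD [])

-- ===== PRECONDITION & SPEC =====
def Spec_isValidYesOrNo (user_input : String) (out : Option String) : Prop := out = isValidYesOrNo_alt user_input
instance (user_input : String) (out : Option String) : Decidable (Spec_isValidYesOrNo user_input out) := by unfold Spec_isValidYesOrNo; infer_instance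

-- ===== CLAIM (what is proved, stated in full; the proofs are below) =====
def Claim_equal_isValidYesOrNo : Prop := ∀ (user_input : String), Dom_isValidYesOrNo user_input → Spec_isValidYesOrNo user_input (isValidYesOrNo user_input)

-- ===== LEMMAS AND PROOFS =====
def pvP (i : String) : Bool := i ∈ pvApprovedSet

lemma pvBuildA_eq (l : List String) : ∀ acc, pvBuildA acc l = acc ++ l.filter pvP := by
  induction l with
  | nil => intro acc; simp [pvBuildA]
  | cons i rest ih =>
    intro acc
    by_cases h : pvP i = true
    · have : pvBuildA acc (i :: rest) = pvBuildA (acc ++ [i]) rest := by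
        simp only [pvP, pvApprovedSet, List.mem_cons, List.not_mem_nil, or_false,
          decide_eq_true_eq] at h
        rcases h with h|h|h|h|h|h|h|h <;> simp [pvBuildA, h]
      rw [this, ih, List.filter_cons_of_pos h]; simp
    · have : pvBuildA acc (i :: rest) = pvBuildA acc rest := by
        simp only [pvP, pvApprovedSet, List.mem_cons, List.not_mem_nil, or_false,
          decide_eq_true_eq, not_or] at h
        obtain ⟨h1,h2,h3,h4,h5,h6,h7,h8⟩ := h
        simp [pvBuildA, h1,h2,h3,h4,h5,h6,h7,h8]
      rw [this, ih, List.filter_cons_of_neg (by simp [h])]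

lemma pvFlagsA_fst (l : List String) : ∀ fy fn st, (pvFlagsA fy fn st l).1 = fy + l.length := by
  induction l with
  | nil => intro fy fn st; simp [pvFlagsA]
  | cons i rest ih =>
    intro fy fn st
    simp only [pvFlagsA]
    rw [if_pos (Or.inr (by decide))]
    rw [ih]; simp [List.length_cons]; ring

lemma pvScanB_eq (l : List String) : pvScanB l = if l.any pvP then some "yes" else none := by
  induction l with
  | nil => simp [pvScanB]
  | cons t rest ih =>
    by_cases h : t ∈ pvApprovedSet
    · simp [pvScanB, h, pvP]
    · simp [pvScanB, h, ih, pvP]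

-- ===== VERDICT (by name: the statement is the Claim_ definition above) =====
theorem isValidYesOrNo_spec : Claim_equal_isValidYesOrNo := by
  intro u _
  unfold Spec_isValidYesOrNo isValidYesOrNo isValidYesOrNo_alt
  rw [pvScanB_eq]
  simp only []
  rw [pvBuildA_eq, List.nil_append, pvFlagsA_fst]
  by_cases h : (((PySem.Str.split? u " ").getD []).filter pvP) = []
  · rw [h]
    have hne : ¬ ((PySem.Str.split? u " ").getD []).any pvP = true := by
      simp only [List.any_eq_true, not_exists]
      rintro x ⟨hm, hpx⟩
      exact absurd (List.mem_filter.mpr ⟨hm, hpx⟩) (by simp [h])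
    simp [pvFlagsA, hne]
  · have hlen : (0 : Int) + (((PySem.Str.split? u " ").getD []).filter pvP).length ≠ 0 := by
      have := List.length_pos_of_ne_nil h; omega
    rw [if_pos hlen]
    have : ((PySem.Str.split? u " ").getD []).any pvP = true := by
      obtain ⟨x, hx⟩ := List.exists_mem_of_ne_nil _ h
      have := List.mem_filter.mp hx
      exact List.any_eq_true.mpr ⟨x, this.1, this.2⟩
    simp [this]
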